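-- pv_equiv track=rewrite | github.com/tamos/MACS30200proj | paper_code/DataSets.py | assign_round
-- ===== SOURCE A (Python) =====
-- def assign_round(new_x):
--     '''Helper to assign rounds correctly
--     '''
--     start = 20170101
--     # from http://iraqdtm.iom.int/IDPsML.aspx
--     upper_dates = [20170105, 20170119, 20170202, 20170216,
--                   20170302, 20170316, 20170330, 20170413,
--                   20170427, 20170515, 20170530, 20170615,
--                   20170630, 20170715, 20170730, 20170815,
--                   20170830, 20170915, 20170930, 20171015,
--                   20171031, 20171115, 20171129, 20171215,
--                   20171231,
--                   20180115,20180131, 20180215, 20180228,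
--                   20180315, 20180330, 20180415, 20180430,
--                   ]
--     top_val = len(upper_dates)
--     offset = len(upper_dates)
--
--     for i in upper_dates:
--         if new_x > i:
--             offset -= 1
--             start = i
--         else:
--             return top_val - offset
-- ===== SOURCE B (Python) =====
-- def assign_round(new_x):
--     '''Helper to assign rounds correctly (hand-rolled binary search)
--     '''
--     upper_dates = [20170105, 20170119, 20170202, 20170216,
--                   20170302, 20170316, 20170330, 20170413,
--                   20170427, 20170515, 20170530, 20170615,
--                   20170630, 20170715, 20170730, 20170815,
--                   20170830, 20170915, 20170930, 20171015,
--                   20171031, 20171115, 20171129, 20171215,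
--                   20171231,
--                   20180115, 20180131, 20180215, 20180228,
--                   20180315, 20180330, 20180415, 20180430,
--                   ]
--     lo, hi = 0, len(upper_dates)
--     while lo < hi:
--         mid = (lo + hi) // 2
--         if upper_dates[mid] < new_x:
--             lo = mid + 1
--         else:
--             hi = mid
--     if lo == len(upper_dates):
--         return None
--     return lo
-- ===== Notes on version B (the rewrite author's own statement) =====
-- stated objective: alternative
-- what changed: Replaced A's sequential offset-maintaining scan over the date list with a hand-rolled lo/hi binary search for the leftmost date not below new_x, returning None when the search runs off the end.
import Mathlib
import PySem

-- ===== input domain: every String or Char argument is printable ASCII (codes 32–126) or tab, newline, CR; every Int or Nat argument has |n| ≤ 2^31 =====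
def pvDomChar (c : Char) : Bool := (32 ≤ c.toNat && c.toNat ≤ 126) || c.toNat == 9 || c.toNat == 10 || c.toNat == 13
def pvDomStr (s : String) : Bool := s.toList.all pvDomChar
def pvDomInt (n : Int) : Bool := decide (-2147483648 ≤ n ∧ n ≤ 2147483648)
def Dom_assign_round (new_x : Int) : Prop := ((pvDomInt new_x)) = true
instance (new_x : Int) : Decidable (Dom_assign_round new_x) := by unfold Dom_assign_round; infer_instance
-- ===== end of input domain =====

-- B replaces A's sequential offset-counting scan with a hand-rolled lo/hi binary search
-- over the same sorted constant date list (objective: alternative algorithm; same return value).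

-- the constant survey-round upper dates (shared literal data of both Pythons)
def upperDates : List Int :=
  [20170105, 20170119, 20170202, 20170216,
   20170302, 20170316, 20170330, 20170413,
   20170427, 20170515, 20170530, 20170615,
   20170630, 20170715, 20170730, 20170815,
   20170830, 20170915, 20170930, 20171015,
   20171031, 20171115, 20171129, 20171215,
   20171231,
   20180115, 20180131, 20180215, 20180228,
   20180315, 20180330, 20180415, 20180430]

-- ===== PORT A =====
-- the for-loop of A: state (offset, start); falls through to None (Python implicit return)
def assignLoopA (new_x : Int) : List Int → Int → Int → Int → Option Int
  | [], _, _, _ => none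
  | i :: rest, top_val, offset, _start =>
    if new_x > i then assignLoopA new_x rest top_val (offset - 1) i
    else some (top_val - offset)

def assign_round (new_x : Int) : Option Int :=
  let start : Int := 20170101
  let top_val : Int := upperDates.length
  let offset : Int := upperDates.length
  assignLoopA new_x upperDates top_val offset start

-- ===== PORT B =====
-- the while-loop of B: binary search for the leftmost date not below new_x
def bsearchB (new_x : Int) (lo hi : Nat) : Nat :=
  if _h : lo < hi then
    let mid := (lo + hi) / 2
    if upperDates.getD mid 0 < new_x then bsearchB new_x (mid + 1) hi
    else bsearchB new_x lo mid
  else lo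
termination_by hi - lo
decreasing_by all_goals omega

def assign_round_alt (new_x : Int) : Option Int :=
  let lo := bsearchB new_x 0 upperDates.length
  if lo = upperDates.length then none else some (lo : Int)

-- ===== PRECONDITION & SPEC =====
def Spec_assign_round (new_x : Int) (out : Option Int) : Prop := out = assign_round_alt new_x
instance (new_x : Int) (out : Option Int) : Decidable (Spec_assign_round new_x out) := by unfold Spec_assign_round; infer_instance

-- ===== CLAIM (what is proved, stated in full; the proofs are below) =====
def Claim_equal_assign_round : Prop := ∀ (new_x : Int), Dom_assign_round new_x → Spec_assign_round new_x (assign_round new_x)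

-- ===== LEMMAS AND PROOFS =====

-- index access into the constant date list (proof helper)
def dAt (k : Nat) : Int := upperDates.getD k 0

-- count of dates strictly below x (the index A returns, abstractly)
def cntLt (x : Int) : Nat := (upperDates.takeWhile (fun i => decide (i < x))).length

lemma tw_le (p : Int → Bool) (l : List Int) : (l.takeWhile p).length ≤ l.length := by
  induction l with
  | nil => simp
  | cons i rest ih =>
    by_cases h : p i <;> simp [List.takeWhile_cons, h] <;> omega

lemma tw_lt (p : Int → Bool) (l : List Int) (k : Nat)
    (hk : k < (l.takeWhile p).length) : p (l.getD k 0) = true := by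
  induction l generalizing k with
  | nil => simp at hk
  | cons i rest ih =>
    by_cases h : p i
    · cases k with
      | zero => simpa [h]
      | succ k =>
        simp only [List.takeWhile_cons, h, if_true, List.length_cons] at hk
        simpa using ih k (by omega)
    · simp [List.takeWhile_cons, h] at hk

lemma tw_stop (p : Int → Bool) (l : List Int)
    (hk : (l.takeWhile p).length < l.length) :
    p (l.getD (l.takeWhile p).length 0) = false := by
  induction l with
  | nil => simp at hk
  | cons i rest ih =>
    by_cases h : p i
    · simp only [List.takeWhile_cons, h, if_true, List.length_cons] at hk ⊢
      simpa using ih (by omega)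
    · simpa [List.takeWhile_cons, h] using h

lemma cnt_le (x : Int) : cntLt x ≤ 33 := tw_le _ _

lemma cnt_lt (x : Int) (k : Nat) (h : k < cntLt x) : dAt k < x := by
  have := tw_lt (fun i => decide (i < x)) upperDates k h
  simpa [dAt, decide_eq_true_eq] using this

lemma cnt_stop (x : Int) (h : cntLt x < 33) : x ≤ dAt (cntLt x) := by
  have := tw_stop (fun i => decide (i < x)) upperDates h
  simp only [decide_eq_false_iff_not, not_lt] at this
  exact this

lemma loopA_eq (x : Int) (l : List Int) (tv off s : Int) :
    assignLoopA x l tv off s =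
      if (l.takeWhile (fun i => decide (i < x))).length = l.length then none
      else some (tv - off + ((l.takeWhile (fun i => decide (i < x))).length : Int)) := by
  induction l generalizing off s with
  | nil => simp [assignLoopA]
  | cons i rest ih =>
    by_cases h : i < x
    · rw [show assignLoopA x (i :: rest) tv off s = assignLoopA x rest tv (off - 1) i from
        by simp [assignLoopA, h], ih]
      simp only [List.takeWhile_cons, h, decide_true, if_true, List.length_cons]
      split_ifs with h1 h2 h2 <;> first
        | rfl
        | omega
        | (congr 1; push_cast; ring)
    · simp [assignLoopA, h, List.takeWhile_cons]

lemma d_adj : ∀ k, k < 32 → dAt k ≤ dAt (k + 1) := by decide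

lemma d_mono : ∀ j k : Nat, j ≤ k → k < 33 → dAt j ≤ dAt k := by
  intro j k hjk hk
  induction k with
  | zero => interval_cases j; rfl
  | succ k ih =>
    rcases Nat.lt_or_ge j (k + 1) with h | h
    · exact le_trans (ih (by omega) (by omega)) (d_adj k (by omega))
    · have : j = k + 1 := by omega
      subst this; rfl

lemma bsearch_inv (x : Int) : ∀ (n lo hi : Nat), hi - lo ≤ n → lo ≤ hi → hi ≤ 33 →
    (∀ k, k < lo → dAt k < x) → (∀ k, hi ≤ k → k < 33 → x ≤ dAt k) →
    bsearchB x lo hi ≤ hi ∧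
    (∀ k, k < bsearchB x lo hi → dAt k < x) ∧
    (∀ k, bsearchB x lo hi ≤ k → k < 33 → x ≤ dAt k) := by
  intro n
  induction n with
  | zero =>
    intro lo hi hn hle hhi hlo hhiP
    have : ¬ lo < hi := by omega
    rw [bsearchB]
    simp only [this, dite_false]
    exact ⟨by omega, hlo, fun k hk h33 => hhiP k (by omega) h33⟩
  | succ n ih =>
    intro lo hi hn hle hhi hlo hhiP
    rw [bsearchB]
    by_cases h : lo < hi
    · simp only [h, dite_true]
      by_cases hcmp : upperDates.getD ((lo + hi) / 2) 0 < x
      · rw [if_pos hcmp]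
        refine ih ((lo + hi) / 2 + 1) hi (by omega) (by omega) hhi ?_ hhiP
        intro k hk
        rcases Nat.lt_or_ge k lo with h' | h'
        · exact hlo k h'
        · exact lt_of_le_of_lt (d_mono k ((lo + hi) / 2) (by omega) (by omega)) hcmp
      · rw [if_neg hcmp]
        have hres := ih lo ((lo + hi) / 2) (by omega) (by omega) (by omega) hlo ?_
        · exact ⟨by omega, hres.2.1, hres.2.2⟩
        · intro k hk h33
          exact le_trans (not_lt.mp hcmp) (d_mono ((lo + hi) / 2) k hk h33)
    · simp only [h, dite_false]
      exact ⟨by omega, hlo, fun k hk h33 => hhiP k (by omega) h33⟩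

lemma bsearch_eq_cnt (x : Int) : bsearchB x 0 33 = cntLt x := by
  obtain ⟨hb, h2, h3⟩ := bsearch_inv x 33 0 33 (by omega) (by omega) (le_refl _)
    (by omega) (by omega)
  have hcle := cnt_le x
  rcases Nat.lt_trichotomy (bsearchB x 0 33) (cntLt x) with h | h | h
  · exfalso
    have h1 := cnt_lt x (bsearchB x 0 33) h
    have h4 := h3 (bsearchB x 0 33) (le_refl _) (by omega)
    omega
  · exact h
  · exfalso
    have h1 := cnt_stop x (by omega)
    have h4 := h2 (cntLt x) h
    omega

-- ===== VERDICT (by name: the statement is the Claim_ definition above) =====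
theorem assign_round_spec : Claim_equal_assign_round := by
  intro x _
  unfold Spec_assign_round assign_round assign_round_alt
  rw [loopA_eq]
  have hlen : upperDates.length = 33 := by rfl
  have hb : bsearchB x 0 upperDates.length = cntLt x := by
    rw [hlen]; exact bsearch_eq_cnt x
  have hcnt : (upperDates.takeWhile (fun i => decide (i < x))).length = cntLt x := rfl
  rw [hcnt, hb, hlen]
  by_cases h1 : cntLt x = 33
  · simp [h1]
  · simp only [h1, if_false]
    congr 1
    push_cast
    ring
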